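-- pv_equiv track=rewrite | github.com/edt-yxz-zzd/python3_src | nn_ns/RMQ/backup-2015/ballot_number.py | xballot_numberss_by_accumulate
-- ===== SOURCE A (Python) =====
-- import itertools
--
-- def xballot_numberss_by_accumulate(Q):
--     if Q <= 0:
--         return []
--
--     pre = [1]
--     xballot = [pre]
--     for q in range(1, Q):
--         xqp = list(itertools.accumulate(pre))
--         xqp.append(xqp[-1])
--         pre = xqp
--         xballot.append(pre)
--     return xballot
-- ===== SOURCE B (Python) =====
-- def comb(n, k):
--     r = 1
--     for i in range(k):
--         r = r * (n - i) // (i + 1)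
--     return r
--
-- def xballot_numberss_by_accumulate(Q):
--     if Q <= 0:
--         return []
--     res = []
--     for q in range(Q):
--         row = [1 if k == 0 else comb(q + k, k) - comb(q + k, k - 1) for k in range(q + 1)]
--         res.append(row)
--     return res
-- ===== Notes on version B (the rewrite author's own statement) =====
-- stated objective: alternative
-- what changed: Each cell is computed directly by the closed-form ballot/Catalan-triangle formula comb(q+k,k)-comb(q+k,k-1) instead of accumulating prefix sums of the previous row.
import Mathlib
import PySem

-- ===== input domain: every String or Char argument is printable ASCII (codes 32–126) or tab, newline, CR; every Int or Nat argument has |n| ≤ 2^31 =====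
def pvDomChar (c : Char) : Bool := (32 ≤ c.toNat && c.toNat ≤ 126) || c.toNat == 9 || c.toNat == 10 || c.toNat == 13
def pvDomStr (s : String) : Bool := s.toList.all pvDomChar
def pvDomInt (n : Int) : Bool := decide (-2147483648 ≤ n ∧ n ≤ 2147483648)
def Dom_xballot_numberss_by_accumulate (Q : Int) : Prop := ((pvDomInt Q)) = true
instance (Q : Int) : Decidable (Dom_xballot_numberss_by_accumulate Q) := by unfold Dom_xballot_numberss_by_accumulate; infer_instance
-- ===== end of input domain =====

-- B computes each cell by the closed-form ballot formula comb(q+k,k)-comb(q+k,k-1)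
-- instead of A's prefix-sum accumulation over the previous row (objective: alternative).

-- ===== PORT A =====
-- list(itertools.accumulate(pre)): running sums
def accumList (l : List Int) : List Int :=
  (l.foldl (fun (st : Int × List Int) x => (st.1 + x, st.2 ++ [st.1 + x])) (0, [])).2

def xballot_numberss_by_accumulate (Q : Int) : List (List Int) :=
  if Q ≤ 0 then []
  else
    ((PySem.List.pyRange 1 Q 1).foldl
      (fun (st : List Int × List (List Int)) _ =>
        let xqp := accumList st.1
        let xqp2 := xqp ++ [xqp.getLast!]   -- xqp.append(xqp[-1]); xqp is never empty
        (xqp2, st.2 ++ [xqp2]))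
      ([1], [[1]])).2

-- ===== PORT B =====
-- hand-written comb: r = r * (n - i) // (i + 1) for i in range(k)
def combI (n k : Int) : Int :=
  (PySem.List.pyRange 0 k 1).foldl (fun r i => PySem.Int.floordiv (r * (n - i)) (i + 1)) 1

def xballot_numberss_by_accumulate_alt (Q : Int) : List (List Int) :=
  if Q ≤ 0 then []
  else
    (PySem.List.pyRange 0 Q 1).map (fun q =>
      (PySem.List.pyRange 0 (q + 1) 1).map (fun k =>
        if k = 0 then (1 : Int) else combI (q + k) k - combI (q + k) (k - 1)))

-- ===== PRECONDITION & SPEC =====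
def Spec_xballot_numberss_by_accumulate (Q : Int) (out : List (List Int)) : Prop := out = xballot_numberss_by_accumulate_alt Q
instance (Q : Int) (out : List (List Int)) : Decidable (Spec_xballot_numberss_by_accumulate Q out) := by unfold Spec_xballot_numberss_by_accumulate; infer_instance

-- ===== CLAIM (what is proved, stated in full; the proofs are below) =====
def Claim_equal_xballot_numberss_by_accumulate : Prop := ∀ (Q : Int), Dom_xballot_numberss_by_accumulate Q → Spec_xballot_numberss_by_accumulate Q (xballot_numberss_by_accumulate Q)

-- ===== LEMMAS AND PROOFS =====

-- the closed-form cell, over Nat indices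
def gN (q k : Nat) : Int :=
  if k = 0 then 1 else (Nat.choose (q + k) k : Int) - (Nat.choose (q + k) (k - 1) : Int)

-- rows of B, over Nat
def rowB (q : Nat) : List Int := (List.range (q + 1)).map (gN q)

-- A's row recursion
def rowA : Nat → List Int
  | 0 => [1]
  | q + 1 => let x := accumList (rowA q); x ++ [x.getLast!]

-- running sums, head-recursive
def psums (s : Int) : List Int → List Int
  | [] => []
  | x :: xs => (s + x) :: psums (s + x) xs

theorem accumList_eq_psums_aux (l : List Int) (s : Int) (out : List Int) :
    (l.foldl (fun (st : Int × List Int) x => (st.1 + x, st.2 ++ [st.1 + x])) (s, out)) =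
      (s + l.sum, out ++ psums s l) := by
  induction l generalizing s out with
  | nil => simp [psums]
  | cons x xs ih => simp [psums, ih (s + x) (out ++ [s + x]), add_assoc]

theorem accumList_eq_psums (l : List Int) : accumList l = psums 0 l := by
  simp [accumList, accumList_eq_psums_aux]

theorem psums_eq_map (l : List Int) (s : Int) :
    psums s l = (List.range l.length).map (fun k => s + ((l.take (k + 1)).sum)) := by
  induction l generalizing s with
  | nil => simp [psums]
  | cons x xs ih =>
    simp only [psums, List.length_cons, List.range_succ_eq_map, List.map_cons, List.map_map]
    congr 1
    · simp
    · rw [ih (s + x)]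
      apply List.map_congr_left
      intro k _
      simp [Function.comp, add_assoc]

theorem combI_choose (n k : Nat) (h : k ≤ n) : combI (n : Int) (k : Int) = (Nat.choose n k : Int) := by
  induction k with
  | zero => simp [combI, PySem.List.pyRange_one_eq_nil]
  | succ k ih =>
    have hk : k ≤ n := Nat.le_of_succ_le h
    have hrange : PySem.List.pyRange 0 ((k : Int) + 1) 1 =
        PySem.List.pyRange 0 (k : Int) 1 ++ [(k : Int)] :=
      PySem.List.pyRange_one_succ_right (by positivity)
    have hstep : combI (n : Int) ((k : Int) + 1) =
        PySem.Int.floordiv ((Nat.choose n k : Int) * ((n : Int) - (k : Int))) ((k : Int) + 1) := by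
      unfold combI
      rw [hrange, List.foldl_append]
      have : ((PySem.List.pyRange 0 (k : Int) 1).foldl
          (fun r i => PySem.Int.floordiv (r * ((n : Int) - i)) (i + 1)) 1) = (Nat.choose n k : Int) := by
        have := ih hk
        unfold combI at this
        exact this
      simp [this]
    have hsub : (n : Int) - (k : Int) = ((n - k : Nat) : Int) := by
      omega
    have hdiv : (Nat.choose n k * (n - k)) / (k + 1) = Nat.choose n (k + 1) := by
      rw [← Nat.choose_succ_right_eq]
      exact Nat.mul_div_cancel _ (Nat.succ_pos k)
    push_cast
    push_cast at hstep
    rw [hstep, hsub]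
    rw [show ((Nat.choose n k : Int)) * ((n - k : Nat) : Int) = ((Nat.choose n k * (n - k) : Nat) : Int) by push_cast; ring]
    rw [show ((k : Int) + 1) = ((k + 1 : Nat) : Int) by push_cast; ring]
    rw [PySem.Int.floordiv_natCast]
    rw [hdiv]

-- Pascal step: gN (q+1) k + gN q (k+1) = gN (q+1) (k+1), for k ≤ q
theorem gN_pascal (q k : Nat) (hk : k ≤ q) : gN (q + 1) k + gN q (k + 1) = gN (q + 1) (k + 1) := by
  cases k with
  | zero =>
    simp [gN, Nat.choose_one_right]
    omega
  | succ k =>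
    simp only [gN, Nat.succ_ne_zero, if_false, Nat.add_sub_cancel]
    have e1 : q + 1 + (k + 1) = q + k + 2 := by omega
    have e2 : q + (k + 1 + 1) = q + k + 2 := by omega
    have e3 : q + 1 + (k + 1 + 1) = q + k + 2 + 1 := by omega
    rw [e1, e2, e3]
    rw [show Nat.choose (q + k + 2 + 1) (k + 1 + 1) = Nat.choose (q + k + 2) (k + 1) + Nat.choose (q + k + 2) (k + 1 + 1) from Nat.choose_succ_succ' _ _]
    rw [show Nat.choose (q + k + 2 + 1) (k + 1) = Nat.choose (q + k + 2) k + Nat.choose (q + k + 2) (k + 1) from Nat.choose_succ_succ' _ _]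
    push_cast
    ring

-- partial sums of row q are row (q+1)
theorem gN_sum (q k : Nat) (hk : k ≤ q) :
    ((List.range (k + 1)).map (gN q)).sum = gN (q + 1) k := by
  induction k with
  | zero => simp [gN]
  | succ k ih =>
    rw [List.range_succ, List.map_append, List.sum_append]
    rw [ih (Nat.le_of_succ_le hk)]
    simpa [add_comm] using gN_pascal q k (by omega)

-- last entry duplicates
theorem gN_dup (q : Nat) : gN (q + 1) (q + 1) = gN (q + 1) q := by
  cases q with
  | zero => decide
  | succ p =>
    simp only [gN, Nat.succ_ne_zero, if_false, Nat.add_sub_cancel]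
    set q := p + 1 with hq
    have e1 : q + 1 + (q + 1) = (2 * q + 1) + 1 := by omega
    have e2 : q + 1 + q = 2 * q + 1 := by omega
    rw [e1, e2]
    rw [show Nat.choose (2 * q + 1 + 1) (q + 1) = Nat.choose (2 * q + 1) q + Nat.choose (2 * q + 1) (q + 1) from Nat.choose_succ_succ' _ _]
    rw [show Nat.choose (2 * q + 1 + 1) q = Nat.choose (2 * q + 1) (q - 1) + Nat.choose (2 * q + 1) q from by
      have := Nat.choose_succ_succ' (2 * q + 1) (q - 1)
      rw [show q - 1 + 1 = q from by omega] at this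
      exact this]
    rw [show Nat.choose (2 * q + 1) (q + 1) = Nat.choose (2 * q + 1) q from by
      have := Nat.choose_symm (show q ≤ 2 * q + 1 from by omega)
      rw [show 2 * q + 1 - q = q + 1 from by omega] at this
      exact this]
    rw [show q - 1 = p from rfl]
    push_cast
    ring

theorem accum_rowB (q : Nat) : accumList (rowB q) = (List.range (q + 1)).map (gN (q + 1)) := by
  rw [accumList_eq_psums, psums_eq_map]
  unfold rowB
  simp only [List.length_map, List.length_range]
  apply List.map_congr_left
  intro k hk
  rw [List.mem_range] at hk
  rw [← List.map_take, List.take_range]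
  rw [show min (k + 1) (q + 1) = k + 1 from by omega]
  rw [gN_sum q k (by omega)]
  ring

theorem getLast!_map_range (f : Nat → Int) (n : Nat) :
    ((List.range (n + 1)).map f).getLast! = f n := by
  rw [List.range_succ, List.map_append]
  simp

theorem rowA_eq_rowB (q : Nat) : rowA q = rowB q := by
  induction q with
  | zero => decide
  | succ q ih =>
    simp only [rowA]
    rw [ih, accum_rowB, getLast!_map_range]
    unfold rowB
    simp [List.range_succ, gN_dup]

theorem foldA (l : List Int) (m : Nat) :
    (l.foldl
      (fun (st : List Int × List (List Int)) _ =>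
        let xqp := accumList st.1
        let xqp2 := xqp ++ [xqp.getLast!]
        (xqp2, st.2 ++ [xqp2]))
      (rowA m, (List.range (m + 1)).map rowA)) =
      (rowA (m + l.length), (List.range (m + l.length + 1)).map rowA) := by
  induction l generalizing m with
  | nil => simp
  | cons x xs ih =>
    simp only [List.foldl_cons, List.length_cons]
    have h1 : (accumList (rowA m) ++ [(accumList (rowA m)).getLast!]) = rowA (m + 1) := rfl
    rw [h1]
    have h2 : (List.range (m + 1)).map rowA ++ [rowA (m + 1)] = (List.range (m + 1 + 1)).map rowA := by
      simp [List.range_succ]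
    rw [h2]
    have := ih (m + 1)
    simpa [Nat.add_assoc, Nat.add_comm, Nat.add_left_comm] using this

theorem alt_eq (Q : Int) : xballot_numberss_by_accumulate_alt Q =
    (List.range Q.toNat).map rowB := by
  unfold xballot_numberss_by_accumulate_alt
  split_ifs with h
  · have h0 : Q.toNat = 0 := by omega
    simp [h0]
  · rw [PySem.List.pyRange_one, List.map_map]
    rw [show (Q - 0).toNat = Q.toNat from by omega]
    apply List.map_congr_left
    intro q _
    simp only [Function.comp]
    rw [show (0 : Int) + (q : Int) = (q : Int) from by ring]
    rw [PySem.List.pyRange_one, List.map_map]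
    rw [show ((q : Int) + 1 - 0).toNat = q + 1 from by omega]
    unfold rowB
    apply List.map_congr_left
    intro k hk
    rw [List.mem_range] at hk
    simp only [Function.comp]
    rw [show (0 : Int) + (k : Int) = (k : Int) from by ring]
    by_cases hk0 : k = 0
    · subst hk0; simp [gN]
    · rw [if_neg (show ¬((k : Int) = 0) from by exact_mod_cast hk0)]
      unfold gN
      rw [if_neg hk0]
      have h1 : (q : Int) + (k : Int) = ((q + k : Nat) : Int) := by push_cast; ring
      have h2 : (k : Int) - 1 = ((k - 1 : Nat) : Int) := by omega
      rw [h1, h2, combI_choose (q + k) k (by omega), combI_choose (q + k) (k - 1) (by omega)]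

-- ===== VERDICT (by name: the statement is the Claim_ definition above) =====
theorem xballot_numberss_by_accumulate_spec : Claim_equal_xballot_numberss_by_accumulate := by
  intro Q _
  unfold Spec_xballot_numberss_by_accumulate
  rw [alt_eq]
  unfold xballot_numberss_by_accumulate
  split_ifs with h
  · have : Q.toNat = 0 := by omega
    simp [this]
  · have hQ : 1 ≤ Q := by omega
    have hlen : (PySem.List.pyRange 1 Q 1).length = (Q - 1).toNat := PySem.List.length_pyRange_one 1 Q
    have h0 : ([1] : List Int) = rowA 0 := rfl
    have h1 : ([[1]] : List (List Int)) = (List.range (0 + 1)).map rowA := rfl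
    rw [h1, h0, foldA]
    have : 0 + (PySem.List.pyRange 1 Q 1).length + 1 = Q.toNat := by
      rw [hlen]; omega
    rw [this]
    exact List.map_congr_left (fun q _ => rowA_eq_rowB q)
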